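-- pv_equiv track=rewrite | github.com/GiorgiaAuroraAdorni/virtual-CAT-data-analysis | src/utils.py | filter_and_track_indexes
-- ===== SOURCE A (Python) =====
-- def filter_and_track_indexes(paint_commands_list):
--     """
--     Filter the consecutive paint commands and track the indices of the paint commands
--     :param paint_commands_list: the list of paint commands
--     :return:                    the filtered list of paint commands and the indices of the paint commands
--     """
--     filtered_list = []
--     indexes = []
--     for i, command in enumerate(paint_commands_list):
--         if i == 0 or command != paint_commands_list[i - 1]:
--             filtered_list.append(command)
--             indexes.append(i)
--
--     return filtered_list, indexes
-- ===== SOURCE B (Python) =====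
-- from itertools import groupby
--
--
-- def filter_and_track_indexes(paint_commands_list):
--     """
--     Filter the consecutive paint commands and track the indices of the paint commands
--     :param paint_commands_list: the list of paint commands
--     :return:                    the filtered list of paint commands and the indices of the paint commands
--     """
--     filtered_list = []
--     indexes = []
--     for _, group in groupby(enumerate(paint_commands_list), key=lambda p: p[1]):
--         i, command = next(group)
--         filtered_list.append(command)
--         indexes.append(i)
--     return filtered_list, indexes
-- ===== Notes on version B (the rewrite author's own statement) =====
-- stated objective: idiomatic
-- what changed: Replaces the index-based loop that compares each element with its predecessor via paint_commands_list[i-1] by itertools.groupby over enumerate, taking the first (index, command) pair of each run of consecutive equal commands.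
import Mathlib
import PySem

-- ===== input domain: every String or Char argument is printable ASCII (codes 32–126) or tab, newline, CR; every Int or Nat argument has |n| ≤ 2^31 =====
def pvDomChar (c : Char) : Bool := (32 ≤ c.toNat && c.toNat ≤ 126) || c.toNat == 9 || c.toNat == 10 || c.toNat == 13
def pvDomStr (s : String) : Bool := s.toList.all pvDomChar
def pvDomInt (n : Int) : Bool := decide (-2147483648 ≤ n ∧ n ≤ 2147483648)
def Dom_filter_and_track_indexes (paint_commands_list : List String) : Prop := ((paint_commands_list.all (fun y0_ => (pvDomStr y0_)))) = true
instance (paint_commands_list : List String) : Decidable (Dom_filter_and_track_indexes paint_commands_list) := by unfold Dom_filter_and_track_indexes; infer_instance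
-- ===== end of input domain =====

-- B replaces A's index-based comparison with the predecessor (paint_commands_list[i-1]) by
-- grouping consecutive equal runs (itertools.groupby over enumerate) and keeping each run's
-- first (index, command) pair; idiomatic, same cost.

-- ===== PORT A =====
def filter_and_track_indexes (paint_commands_list : List String) : List String × List Int :=
  (PySem.List.enumerate paint_commands_list).foldl
    (fun acc p =>
      if p.1 = 0 ∨ PySem.List.pyGet? paint_commands_list (p.1 - 1) ≠ some p.2 then
        (acc.1 ++ [p.2], acc.2 ++ [p.1])
      else acc)
    ([], [])

-- ===== PORT B =====
-- port of the groupby loop: each step takes the first (index, command) pair of a run and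
-- skips the rest of the run (groupby's consumption of the group) via dropWhile
def pvGroupFirsts : List (Int × String) → List String × List Int
  | [] => ([], [])
  | (i, s) :: rest =>
      (s :: (pvGroupFirsts (rest.dropWhile (fun p => p.2 == s))).1,
       i :: (pvGroupFirsts (rest.dropWhile (fun p => p.2 == s))).2)
termination_by l => l.length
decreasing_by
  all_goals
    simp only [List.length_cons]
    exact Nat.lt_succ_of_le (List.length_dropWhile_le _ _)

def filter_and_track_indexes_alt (paint_commands_list : List String) : List String × List Int :=
  pvGroupFirsts (PySem.List.enumerate paint_commands_list)

-- ===== PRECONDITION & SPEC =====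
def Spec_filter_and_track_indexes (paint_commands_list : List String) (out : List String × List Int) : Prop := out = filter_and_track_indexes_alt paint_commands_list
instance (paint_commands_list : List String) (out : List String × List Int) : Decidable (Spec_filter_and_track_indexes paint_commands_list out) := by unfold Spec_filter_and_track_indexes; infer_instance

-- ===== CLAIM (what is proved, stated in full; the proofs are below) =====
def Claim_equal_filter_and_track_indexes : Prop := ∀ (paint_commands_list : List String), Dom_filter_and_track_indexes paint_commands_list → Spec_filter_and_track_indexes paint_commands_list (filter_and_track_indexes paint_commands_list)

-- ===== LEMMAS AND PROOFS =====

-- reference recursion: walk the list carrying the previous element and the current index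
def pvCanon : List String → Option String → Int → List String × List Int
  | [], _, _ => ([], [])
  | x :: rest, prev, n =>
      if some x = prev then pvCanon rest (some x) (n + 1)
      else (x :: (pvCanon rest (some x) (n + 1)).1, n :: (pvCanon rest (some x) (n + 1)).2)

theorem pvA_gen : ∀ (rest pre : List String) (a : List String) (b : List Int),
    (PySem.List.enumerate rest (pre.length : Int)).foldl
      (fun acc p =>
        if p.1 = 0 ∨ PySem.List.pyGet? (pre ++ rest) (p.1 - 1) ≠ some p.2 then
          (acc.1 ++ [p.2], acc.2 ++ [p.1])
        else acc)
      (a, b)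
    = (a ++ (pvCanon rest pre.getLast? (pre.length : Int)).1,
       b ++ (pvCanon rest pre.getLast? (pre.length : Int)).2) := by
  intro rest
  induction rest with
  | nil => intro pre a b; simp [PySem.List.enumerate_nil, pvCanon]
  | cons y rest ih =>
    intro pre a b
    rw [PySem.List.enumerate_cons, List.foldl_cons]
    cases pre with
    | nil =>
      rw [if_pos (Or.inl (by simp))]
      have hstep := ih [y] (a ++ [y]) (b ++ [((List.length ([] : List String)) : Int)])
      have e1 : ([y] : List String) ++ rest = ([] : List String) ++ y :: rest := by simp
      have e2 : (([y] : List String).length : Int) = ((List.length ([] : List String)) : Int) + 1 := by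
        simp
      have e3 : ([y] : List String).getLast? = some y := by simp
      rw [e1, e2, e3] at hstep
      refine Eq.trans hstep ?_
      conv_rhs => rw [pvCanon]
      rw [if_neg (by simp)]
      simp
    | cons z zs =>
      have hne : (((z :: zs).length : Nat) : Int) ≠ 0 := by
        simp only [List.length_cons]
        push_cast
        omega
      have hget : PySem.List.pyGet? ((z :: zs) ++ y :: rest) ((((z :: zs).length : Nat) : Int) - 1)
          = (z :: zs).getLast? := by
        have h1 : ((((z :: zs).length : Nat) : Int) - 1) = ((zs.length : Nat) : Int) := by simp
        rw [h1, PySem.List.pyGet?_natCast]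
        rw [List.getElem?_append_left (by simp)]
        simp [List.getLast?_eq_getElem?]
      have e1 : ((z :: zs) ++ [y]) ++ rest = (z :: zs) ++ y :: rest := by simp
      have e2 : ((((z :: zs) ++ [y]).length : Nat) : Int) = (((z :: zs).length : Nat) : Int) + 1 := by
        simp
      have e3 : ((z :: zs) ++ [y]).getLast? = some y := List.getLast?_concat
      by_cases hprev : some y = (z :: zs).getLast?
      · rw [if_neg (fun h => h.elim hne (fun hb => hb (by rw [hget, ← hprev])))]
        have hstep := ih ((z :: zs) ++ [y]) a b
        rw [e1, e2, e3] at hstep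
        refine Eq.trans hstep ?_
        conv_rhs => rw [pvCanon]
        rw [if_pos hprev]
      · rw [if_pos (Or.inr (by rw [hget]; exact fun h => hprev h.symm))]
        have hstep := ih ((z :: zs) ++ [y]) (a ++ [y]) (b ++ [(((z :: zs).length : Nat) : Int)])
        rw [e1, e2, e3] at hstep
        refine Eq.trans hstep ?_
        conv_rhs => rw [pvCanon]
        rw [if_neg hprev]
        simp

theorem pvA_eq_canon (xs : List String) :
    filter_and_track_indexes xs = pvCanon xs none 0 := by
  have h := pvA_gen xs [] [] []
  simp only [List.length_nil, Nat.cast_zero, List.nil_append, List.getLast?_nil] at h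
  exact h

-- the carried previous element is irrelevant once it cannot match the head
theorem pvCanon_prev_irrel (ys : List String) (p q : Option String) (n : Int)
    (hp : ∀ z, ys.head? = some z → some z ≠ p) (hq : ∀ z, ys.head? = some z → some z ≠ q) :
    pvCanon ys p n = pvCanon ys q n := by
  cases ys with
  | nil => rfl
  | cons y t =>
    rw [pvCanon, pvCanon, if_neg (hp y (by simp)), if_neg (hq y (by simp))]

theorem pvCanon_skip (ys : List String) (s : String) (n : Int) :
    pvCanon ys (some s) n
      = pvCanon (ys.dropWhile (fun z => z == s)) (some s)
          (n + ((ys.takeWhile (fun z => z == s)).length : Int)) := by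
  induction ys generalizing n with
  | nil => simp
  | cons y t ih =>
    by_cases h : y = s
    · subst h
      rw [pvCanon, if_pos rfl]
      rw [List.dropWhile_cons_of_pos (by simp), List.takeWhile_cons_of_pos (by simp)]
      rw [ih (n + 1)]
      congr 1
      simp only [List.length_cons]
      push_cast
      ring
    · rw [List.dropWhile_cons_of_neg (by simp [h]), List.takeWhile_cons_of_neg (by simp [h])]
      simp

theorem pvEnum_dropWhile (t : List String) (s : String) (n : Int) :
    (PySem.List.enumerate t n).dropWhile (fun p => p.2 == s)
      = PySem.List.enumerate (t.dropWhile (fun z => z == s))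
          (n + ((t.takeWhile (fun z => z == s)).length : Int)) := by
  induction t generalizing n with
  | nil => simp [PySem.List.enumerate_nil]
  | cons y t ih =>
    rw [PySem.List.enumerate_cons]
    by_cases h : y = s
    · subst h
      rw [List.dropWhile_cons_of_pos (by simp), List.dropWhile_cons_of_pos (by simp),
          List.takeWhile_cons_of_pos (by simp)]
      rw [ih (n + 1)]
      congr 1
      simp only [List.length_cons]
      push_cast
      ring
    · rw [List.dropWhile_cons_of_neg (by simp [h]), List.dropWhile_cons_of_neg (by simp [h]),
          List.takeWhile_cons_of_neg (by simp [h])]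
      simp

theorem pvDropWhile_head (q : String → Bool) (t : List String) :
    ∀ z, (t.dropWhile q).head? = some z → q z = false := by
  induction t with
  | nil => intro z h; simp at h
  | cons a b ih =>
    intro z h
    by_cases hq : q a
    · rw [List.dropWhile_cons_of_pos hq] at h; exact ih z h
    · rw [List.dropWhile_cons_of_neg hq] at h
      simp at h
      rw [← h]
      simpa using hq

theorem pvB_eq_canon_aux : ∀ (m : Nat) (xs : List String) (n : Int), xs.length ≤ m →
    pvGroupFirsts (PySem.List.enumerate xs n) = pvCanon xs none n := by
  intro m
  induction m with
  | zero =>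
    intro xs n h
    have hxs : xs = [] := List.length_eq_zero_iff.mp (Nat.le_zero.mp h)
    subst hxs
    rw [PySem.List.enumerate_nil, pvGroupFirsts, pvCanon]
  | succ m ih =>
    intro xs n h
    cases xs with
    | nil => rw [PySem.List.enumerate_nil, pvGroupFirsts, pvCanon]
    | cons x t =>
      rw [PySem.List.enumerate_cons, pvGroupFirsts]
      rw [pvEnum_dropWhile t x (n + 1)]
      have hlen : (t.dropWhile (fun z => z == x)).length ≤ m := by
        have := List.length_dropWhile_le (fun z => z == x) t
        simp only [List.length_cons] at h
        omega
      rw [ih _ _ hlen]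
      have hhead : ∀ z, (t.dropWhile (fun z => z == x)).head? = some z → some z ≠ some x := by
        intro z hz heq
        have hf := pvDropWhile_head (fun z => z == x) t z hz
        have hzx : z = x := by injection heq
        rw [hzx] at hf
        simp at hf
      have hskip : pvCanon t (some x) (n + 1)
          = pvCanon (t.dropWhile (fun z => z == x)) none
              (n + 1 + ((t.takeWhile (fun z => z == x)).length : Int)) :=
        (pvCanon_skip t x (n + 1)).trans
          (pvCanon_prev_irrel _ _ _ _ hhead (by intro z hz heq; simp at heq))
      conv_rhs => rw [pvCanon]
      rw [if_neg (by simp), hskip]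

-- ===== VERDICT (by name: the statement is the Claim_ definition above) =====
theorem filter_and_track_indexes_spec : Claim_equal_filter_and_track_indexes := by
  intro xs _
  unfold Spec_filter_and_track_indexes filter_and_track_indexes_alt
  rw [pvA_eq_canon, pvB_eq_canon_aux xs.length xs 0 le_rfl]
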